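-- pv_equiv track=rewrite | github.com/uninghetvatly/python-group-study-project | BaoHuynh/Codeforce_ex.py | num_move_brackets
-- ===== SOURCE A (Python) =====
-- def num_move_brackets(s, n):
--     ok = 0
--     count = 0
--     for i in range(n):
--         if ok == 0 and s[i] == ')':
--             count += 1
--             continue
--         if s[i] == '(':
--             ok += 1
--         else:
--             ok -= 1
--     return count
-- ===== SOURCE B (Python) =====
-- def num_move_brackets(s, n):
--     # staged passes: materialize the scanned prefix, build the list of running
--     # balances (prefix sums), then the answer is the negated minimum prefix balance
--     chars = [s[i] for i in range(n)]           # preserves A's IndexError for n > len(s)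
--     prefixes = [0]
--     bal = 0
--     for c in chars:
--         bal += 1 if c == '(' else -1
--         prefixes.append(bal)
--     return -min(prefixes)
-- ===== Notes on version B (the rewrite author's own statement) =====
-- stated objective: alternative
-- what changed: Replaces A's reset-and-count state machine (counter 'ok' held at zero plus a moved-bracket count) by staged passes: materialize the prefix, build the list of running prefix balances, and return the negated minimum of that list.
-- outside the precondition, e.g. on num_move_brackets('ab)a', 4): A returns 0, B returns 4; on num_move_brackets('a', 1): A returns 0, B returns 1
import Mathlib
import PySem

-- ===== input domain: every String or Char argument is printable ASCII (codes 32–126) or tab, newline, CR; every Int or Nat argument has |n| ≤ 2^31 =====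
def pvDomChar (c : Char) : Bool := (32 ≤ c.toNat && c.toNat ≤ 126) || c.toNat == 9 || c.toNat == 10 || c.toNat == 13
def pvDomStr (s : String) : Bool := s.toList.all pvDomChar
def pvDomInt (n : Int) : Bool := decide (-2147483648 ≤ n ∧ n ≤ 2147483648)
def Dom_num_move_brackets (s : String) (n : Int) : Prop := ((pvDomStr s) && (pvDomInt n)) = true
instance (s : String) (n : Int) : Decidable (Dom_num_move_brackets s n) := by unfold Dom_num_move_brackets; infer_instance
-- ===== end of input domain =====

-- B replaces A's one-pass reset-and-count state machine by staged passes: materialize the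
-- prefix, build the list of running prefix balances, and return the negated minimum of that
-- list; same O(n) cost, a genuinely different decomposition.

-- ===== PORT A =====
def num_move_brackets (s : String) (n : Int) : Int :=
  let cs := s.toList
  ((PySem.List.pyRange 0 n 1).foldl (fun (st : Int × Int) i =>
      let c := PySem.List.pyGetD cs i ' '   -- s[i]; Pre_ guarantees the index is in range
      if st.1 = 0 ∧ c = ')' then (st.1, st.2 + 1)        -- if ok == 0 and s[i] == ')': count += 1; continue
      else if c = '(' then (st.1 + 1, st.2)              -- if s[i] == '(': ok += 1
      else (st.1 - 1, st.2))                             -- else: ok -= 1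
    ((0 : Int), (0 : Int))).2

-- ===== PORT B =====
-- min(prefixes); prefixes is never empty (it starts as [0]), the [] case is unreachable
def pvMin : List Int → Int
  | [] => 0
  | x :: xs => xs.foldl min x

def num_move_brackets_alt (s : String) (n : Int) : Int :=
  let cs := s.toList
  let chars := (PySem.List.pyRange 0 n 1).map (fun i => PySem.List.pyGetD cs i ' ')  -- [s[i] for i in range(n)]
  let r := chars.foldl (fun (st : List Int × Int) c =>
      let bal := st.2 + (if c = '(' then 1 else -1)      -- bal += 1 if c == '(' else -1
      (st.1 ++ [bal], bal))                              -- prefixes.append(bal)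
    (([(0 : Int)]), (0 : Int))
  Neg.neg (pvMin r.1)            -- return -min(prefixes)

-- ===== PRECONDITION & SPEC =====
-- Pre_ excludes n > len(s) (there the Python A raises IndexError) and restricts the scanned
-- prefix s[:n] to the function's natural domain of '(' / ')' characters only: the task is
-- counting brackets to move in a bracket sequence, and on prefixes containing other
-- characters A still returns a value that B does not match.
def Pre_num_move_brackets (s : String) (n : Int) : Prop :=
  n ≤ (s.toList.length : Int) ∧ (s.toList.take n.toNat).all (fun c => c == '(' || c == ')') = true
instance (s : String) (n : Int) : Decidable (Pre_num_move_brackets s n) := by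
  unfold Pre_num_move_brackets; infer_instance
def pvWitness_num_move_brackets : String × Int := ("(()))(", 5)

def Spec_num_move_brackets (s : String) (n : Int) (out : Int) : Prop := out = num_move_brackets_alt s n
instance (s : String) (n : Int) (out : Int) : Decidable (Spec_num_move_brackets s n out) := by unfold Spec_num_move_brackets; infer_instance

-- ===== CLAIM (what is proved, stated in full; the proofs are below) =====
def Claim_equal_num_move_brackets : Prop := ∀ (s : String) (n : Int), Dom_num_move_brackets s n → Pre_num_move_brackets s n → Spec_num_move_brackets s n (num_move_brackets s n)

-- ===== LEMMAS AND PROOFS =====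

-- A's step function over the characters themselves.
def pvStepA (st : Int × Int) (c : Char) : Int × Int :=
  if st.1 = 0 ∧ c = ')' then (st.1, st.2 + 1)
  else if c = '(' then (st.1 + 1, st.2)
  else (st.1 - 1, st.2)

-- B's step function over the characters themselves.
def pvStepB (st : List Int × Int) (c : Char) : List Int × Int :=
  let bal := st.2 + (if c = '(' then 1 else -1)
  (st.1 ++ [bal], bal)

-- the list of running balances produced from starting balance bal
def pvScan (bal : Int) : List Char → List Int
  | [] => []
  | c :: cs => let b := bal + (if c = '(' then 1 else -1); b :: pvScan b cs

theorem pvStepB_scan (l : List Char) (acc : List Int) (bal : Int) :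
    (l.foldl pvStepB (acc, bal)).1 = acc ++ pvScan bal l := by
  induction l generalizing acc bal with
  | nil => simp [pvScan]
  | cons c l ih =>
    simp only [List.foldl_cons, pvStepB, pvScan, ih, List.append_assoc, List.cons_append,
      List.nil_append]

-- Invariant linking A's (ok, count) to the minimum of the remaining balance scan:
-- ok = bal - low, count = -low.
theorem pvKey (l : List Char) (h : ∀ c ∈ l, c = '(' ∨ c = ')')
    (ok count bal low : Int)
    (h1 : ok = bal - low) (h2 : count = -low) (h3 : low ≤ bal) (h4 : low ≤ 0) :
    (l.foldl pvStepA (ok, count)).2 = -((pvScan bal l).foldl min low) := by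
  induction l generalizing ok count bal low with
  | nil =>
    rw [show pvScan bal [] = [] from rfl]
    simp only [List.foldl_nil]
    omega
  | cons c l ih =>
    have hc := h c (List.mem_cons_self ..)
    have h' : ∀ c ∈ l, c = '(' ∨ c = ')' := fun x hx => h x (List.mem_cons_of_mem _ hx)
    rcases hc with hc | hc
    · subst hc
      have e1 : pvStepA (ok, count) '(' = (ok + 1, count) := by simp [pvStepA]
      have escan : pvScan bal ('(' :: l) = (bal + 1) :: pvScan (bal + 1) l := by
        simp [pvScan]
      have e2 : min low (bal + 1) = low := by omega
      rw [List.foldl_cons, e1, escan, List.foldl_cons, e2]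
      exact ih h' _ _ _ _ (by omega) h2 (by omega) h4
    · subst hc
      have escan : pvScan bal (')' :: l) = (bal + -1) :: pvScan (bal + -1) l := by
        simp [pvScan]
      by_cases hok : ok = 0
      · have e1 : pvStepA (ok, count) ')' = (ok, count + 1) := by simp [pvStepA, hok]
        have hbl : bal = low := by omega
        have e2 : min low (bal + -1) = bal + -1 := by omega
        rw [List.foldl_cons, e1, escan, List.foldl_cons, e2]
        exact ih h' _ _ _ _ (by omega) (by omega) (by omega) (by omega)
      · have e1 : pvStepA (ok, count) ')' = (ok - 1, count) := by simp [pvStepA, hok]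
        have e2 : min low (bal + -1) = low := by omega
        rw [List.foldl_cons, e1, escan, List.foldl_cons, e2]
        exact ih h' _ _ _ _ (by omega) h2 (by omega) h4

-- ===== VERDICT (by name: the statement is the Claim_ definition above) =====
theorem num_move_brackets_spec : Claim_equal_num_move_brackets := by
  intro s n _ hpre
  obtain ⟨hlen, hchars0⟩ := hpre
  have hchars : ∀ c ∈ s.toList.take n.toNat, c = '(' ∨ c = ')' := by
    intro c hc
    have := List.all_eq_true.mp hchars0 c hc
    simpa using this
  unfold Spec_num_move_brackets num_move_brackets num_move_brackets_alt
  by_cases hn : n ≤ 0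
  · rw [PySem.List.pyRange_one_eq_nil hn]
    simp [pvMin]
  · have hn' : 0 < n := by omega
    show ((PySem.List.pyRange 0 n 1).foldl
          (fun st i => pvStepA st (PySem.List.pyGetD s.toList i ' ')) ((0 : Int), (0 : Int))).2
        = -(pvMin (((PySem.List.pyRange 0 n 1).map (fun i => PySem.List.pyGetD s.toList i ' ')).foldl
              pvStepB (([(0 : Int)]), (0 : Int))).1)
    set cs := s.toList with hcs
    set m := n.toNat with hm
    have hmn : (m : Int) = n := Int.toNat_of_nonneg (by omega)
    set cs' := cs.take m with hcs'
    have hml : m ≤ cs.length := by omega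
    have hlen' : cs'.length = m := by simp [hcs', List.length_take]; omega
    have hmem : ∀ x ∈ PySem.List.pyRange 0 n 1,
        PySem.List.pyGetD cs x ' ' = PySem.List.pyGetD cs' x ' ' := by
      intro x hx
      rw [PySem.List.mem_pyRange_one] at hx
      have hx0 : 0 ≤ x := hx.1
      have hxn : x < n := hx.2
      rw [PySem.List.pyGetD_eq_getElem cs _ hx0 (by omega),
          PySem.List.pyGetD_eq_getElem cs' _ hx0 (by omega)]
      simp [hcs', List.getElem_take]
    have hnlen : n = (cs'.length : Int) := by omega
    -- A's fold reads only cs'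
    have hA : (PySem.List.pyRange 0 n 1).foldl
          (fun st i => pvStepA st (PySem.List.pyGetD cs i ' ')) ((0 : Int), (0 : Int))
        = cs'.foldl pvStepA ((0 : Int), (0 : Int)) := by
      have hcong := PySem.List.foldl_congr_mem (l := PySem.List.pyRange 0 n 1)
        (f := fun st i => pvStepA st (PySem.List.pyGetD cs i ' '))
        (g := fun st i => pvStepA st (PySem.List.pyGetD cs' i ' '))
        (init := ((0 : Int), (0 : Int)))
        (fun acc x hx => by simp only [hmem x hx])
      rw [hcong, hnlen]
      exact PySem.List.foldl_pyRange_zero_pyGetD' cs' ' ' pvStepA _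
    -- B's comprehension is exactly cs'
    have hB : (PySem.List.pyRange 0 n 1).map (fun i => PySem.List.pyGetD cs i ' ') = cs' := by
      rw [List.map_congr_left hmem, hnlen]
      exact PySem.List.map_pyGetD_pyRange_zero' cs' ' '
    rw [hA, hB, pvStepB_scan]
    have hminEq : pvMin ([(0 : Int)] ++ pvScan 0 cs') = (pvScan 0 cs').foldl min 0 := by
      simp [pvMin]
    rw [hminEq]
    exact pvKey cs' hchars 0 0 0 0 rfl rfl le_rfl le_rfl
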